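-- pv_equiv track=rewrite | github.com/parthalon025/ha-aria | aria/modules/organic_discovery/module.py | _build_cluster_info
-- ===== SOURCE A (Python) =====
-- from typing import Any
--
-- def _build_cluster_info(
--
--     member_ids: list[str],
--     entities: list[dict[str, Any]],
--     devices: dict[str, dict[str, Any]],
-- ) -> dict[str, Any]:
--     """Build metadata dict for naming from member entity IDs."""
--     entity_lookup = {e.get("entity_id", ""): e for e in entities}
--
--     domains: dict[str, int] = {}
--     areas: dict[str, int] = {}
--     device_classes: dict[str, int] = {}
--
--     for eid in member_ids:
--         entity = entity_lookup.get(eid, {})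
--
--         domain = entity.get("domain", "")
--         if domain:
--             domains[domain] = domains.get(domain, 0) + 1
--
--         dc = entity.get("device_class")
--         if dc:
--             device_classes[dc] = device_classes.get(dc, 0) + 1
--
--         # Resolve area through device
--         area = entity.get("area_id")
--         if not area:
--             device_id = entity.get("device_id")
--             if device_id and device_id in devices:
--                 area = devices[device_id].get("area_id")
--         if area:
--             areas[area] = areas.get(area, 0) + 1
--
--     return {
--         "domains": domains,
--         "areas": areas,
--         "device_classes": device_classes,
--     }
-- ===== SOURCE B (Python) =====
-- def _build_cluster_info(
--     member_ids,
--     entities,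
--     devices,
-- ):
--     """Build metadata dict for naming from member entity IDs."""
--     entity_lookup = {e.get("entity_id", ""): e for e in entities}
--     members = [entity_lookup.get(eid, {}) for eid in member_ids]
--
--     def tally(values):
--         counts = {}
--         for v in values:
--             if v:
--                 counts[v] = counts.get(v, 0) + 1
--         return counts
--
--     def device_area(entity):
--         device_id = entity.get("device_id")
--         if device_id and device_id in devices:
--             return devices[device_id].get("area_id")
--         return None
--
--     def resolve_area(entity):
--         return entity.get("area_id") or device_area(entity)
--
--     return {
--         "domains": tally(e.get("domain", "") for e in members),
--         "areas": tally(resolve_area(e) for e in members),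
--         "device_classes": tally(e.get("device_class") for e in members),
--     }
-- ===== Notes on version B (the rewrite author's own statement) =====
-- stated objective: alternative
-- what changed: Replaces A's single fused loop that threads three counter dicts at once with a resolved-members list plus three independent tally passes (a shared tally helper and a resolve_area helper), building each result dict separately.
import Mathlib
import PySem

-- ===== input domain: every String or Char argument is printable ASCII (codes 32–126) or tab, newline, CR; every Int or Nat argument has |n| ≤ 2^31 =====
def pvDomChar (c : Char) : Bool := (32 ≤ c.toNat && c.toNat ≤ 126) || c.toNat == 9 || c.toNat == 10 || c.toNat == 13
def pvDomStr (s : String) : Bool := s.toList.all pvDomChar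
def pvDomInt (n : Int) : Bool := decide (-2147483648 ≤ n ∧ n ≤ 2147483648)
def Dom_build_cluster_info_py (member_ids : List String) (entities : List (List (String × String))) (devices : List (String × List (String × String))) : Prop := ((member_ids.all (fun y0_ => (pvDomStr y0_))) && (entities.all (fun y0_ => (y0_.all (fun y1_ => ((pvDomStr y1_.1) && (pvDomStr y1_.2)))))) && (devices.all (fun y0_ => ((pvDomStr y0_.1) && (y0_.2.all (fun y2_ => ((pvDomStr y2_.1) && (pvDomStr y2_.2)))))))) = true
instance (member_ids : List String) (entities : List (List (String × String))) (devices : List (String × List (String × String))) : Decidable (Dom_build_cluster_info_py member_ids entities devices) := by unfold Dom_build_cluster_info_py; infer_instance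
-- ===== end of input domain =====

-- B replaces A's single fused loop threading three counter dicts with three independent tally
-- passes over the resolved member entities (objective: alternative decomposition, same cost).

-- ===== PORT A =====
-- A's single fused loop: one pass over member_ids updating the three counter dicts together.
def build_cluster_info_py (member_ids : List String) (entities : List (List (String × String))) (devices : List (String × List (String × String))) : List (String × List (String × Int)) :=
  let entity_lookup : PySem.Dict String (List (String × String)) :=
    entities.foldl (fun d e => d.insert ((e.lookup "entity_id").getD "") e) PySem.Dict.empty
  let res :=
    member_ids.foldl
      (fun (st : PySem.Dict String Int × PySem.Dict String Int × PySem.Dict String Int) eid =>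
        let entity := entity_lookup.getD eid []
        let domain := (entity.lookup "domain").getD ""
        let domains := if domain ≠ "" then st.1.insert domain (st.1.getD domain 0 + 1) else st.1
        let dc := entity.lookup "device_class"
        let device_classes :=
          match dc with
          | some s => if s ≠ "" then st.2.2.insert s (st.2.2.getD s 0 + 1) else st.2.2
          | none => st.2.2
        let area := entity.lookup "area_id"
        let area :=
          if (match area with | some s => s != "" | none => false) then area
          else
            match entity.lookup "device_id" with
            | some did =>
              if did ≠ "" && (devices.lookup did).isSome
              then ((devices.lookup did).getD []).lookup "area_id"
              else area
            | none => area
        let areas :=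
          match area with
          | some s => if s ≠ "" then st.2.1.insert s (st.2.1.getD s 0 + 1) else st.2.1
          | none => st.2.1
        (domains, areas, device_classes))
      (PySem.Dict.empty, PySem.Dict.empty, PySem.Dict.empty)
  [("domains", res.1.items), ("areas", res.2.1.items), ("device_classes", res.2.2.items)]

-- ===== PORT B =====
-- Source B's tally helper for a list of strings ('if v:' skips the empty string).
def pvTallyS (vs : List String) : PySem.Dict String Int :=
  vs.foldl (fun d v => if v ≠ "" then d.insert v (d.getD v 0 + 1) else d) PySem.Dict.empty

-- Source B's tally helper for a list of optional strings ('if v:' skips None and '').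
def pvTallyO (vs : List (Option String)) : PySem.Dict String Int :=
  vs.foldl
    (fun d v =>
      match v with
      | some s => if s ≠ "" then d.insert s (d.getD s 0 + 1) else d
      | none => d)
    PySem.Dict.empty

-- Source B's device_area helper.
def pvDeviceArea (devices : List (String × List (String × String))) (entity : List (String × String)) : Option String :=
  match entity.lookup "device_id" with
  | some did =>
    if did ≠ "" && (devices.lookup did).isSome
    then ((devices.lookup did).getD []).lookup "area_id"
    else none
  | none => none

-- Source B's resolve_area helper: entity.get("area_id") or device_area(entity).
def pvResolveArea (devices : List (String × List (String × String))) (entity : List (String × String)) : Option String :=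
  match entity.lookup "area_id" with
  | some s => if s ≠ "" then some s else pvDeviceArea devices entity
  | none => pvDeviceArea devices entity

def build_cluster_info_py_alt (member_ids : List String) (entities : List (List (String × String))) (devices : List (String × List (String × String))) : List (String × List (String × Int)) :=
  let entity_lookup : PySem.Dict String (List (String × String)) :=
    entities.foldl (fun d e => d.insert ((e.lookup "entity_id").getD "") e) PySem.Dict.empty
  let members := member_ids.map (fun eid => entity_lookup.getD eid [])
  [("domains", (pvTallyS (members.map (fun e => (e.lookup "domain").getD ""))).items),
   ("areas", (pvTallyO (members.map (fun e => pvResolveArea devices e))).items),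
   ("device_classes", (pvTallyO (members.map (fun e => e.lookup "device_class"))).items)]

-- ===== PRECONDITION & SPEC =====
def Spec_build_cluster_info_py (member_ids : List String) (entities : List (List (String × String))) (devices : List (String × List (String × String))) (out : List (String × List (String × Int))) : Prop := out = build_cluster_info_py_alt member_ids entities devices
instance (member_ids : List String) (entities : List (List (String × String))) (devices : List (String × List (String × String))) (out : List (String × List (String × Int))) : Decidable (Spec_build_cluster_info_py member_ids entities devices out) := by unfold Spec_build_cluster_info_py; infer_instance

-- ===== CLAIM (what is proved, stated in full; the proofs are below) =====
def Claim_equal_build_cluster_info_py : Prop := ∀ (member_ids : List String) (entities : List (List (String × String))) (devices : List (String × List (String × String))), Dom_build_cluster_info_py member_ids entities devices → Spec_build_cluster_info_py member_ids entities devices (build_cluster_info_py member_ids entities devices)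

-- ===== LEMMAS AND PROOFS =====

-- A's inline area computation (the two-stage let in the fused loop).
def pvAreaA (devices : List (String × List (String × String))) (entity : List (String × String)) : Option String :=
  let area := entity.lookup "area_id"
  if (match area with | some s => s != "" | none => false) then area
  else
    match entity.lookup "device_id" with
    | some did =>
      if did ≠ "" && (devices.lookup did).isSome
      then ((devices.lookup did).getD []).lookup "area_id"
      else area
    | none => area

-- the option-tally step
def pvStepO (d : PySem.Dict String Int) (v : Option String) : PySem.Dict String Int :=
  match v with
  | some s => if s ≠ "" then d.insert s (d.getD s 0 + 1) else d
  | none => d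

lemma stepO_area_eq (devices : List (String × List (String × String))) (entity : List (String × String)) (d : PySem.Dict String Int) :
    pvStepO d (pvAreaA devices entity) = pvStepO d (pvResolveArea devices entity) := by
  unfold pvAreaA pvResolveArea pvDeviceArea pvStepO
  cases h : entity.lookup "area_id" with
  | none =>
    simp only
    cases entity.lookup "device_id" with
    | none => simp
    | some did => split_ifs <;> simp_all
  | some s =>
    by_cases hs : s = ""
    · subst hs
      simp only [show (("" : String) != "") = false from rfl, Bool.false_eq_true, if_false]
      cases entity.lookup "device_id" with
      | none => simp
      | some did =>
        by_cases hd2 : did = "" <;> cases hl : List.lookup did devices <;>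
          simp [hd2, hl]
    · simp [hs]

lemma fused_eq (lk : PySem.Dict String (List (String × String))) (devices : List (String × List (String × String))) (l : List String) (d1 d2 d3 : PySem.Dict String Int) :
    l.foldl
      (fun (st : PySem.Dict String Int × PySem.Dict String Int × PySem.Dict String Int) eid =>
        let entity := lk.getD eid []
        let domain := (entity.lookup "domain").getD ""
        let domains := if domain ≠ "" then st.1.insert domain (st.1.getD domain 0 + 1) else st.1
        let dc := entity.lookup "device_class"
        let device_classes :=
          match dc with
          | some s => if s ≠ "" then st.2.2.insert s (st.2.2.getD s 0 + 1) else st.2.2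
          | none => st.2.2
        let area := entity.lookup "area_id"
        let area :=
          if (match area with | some s => s != "" | none => false) then area
          else
            match entity.lookup "device_id" with
            | some did =>
              if did ≠ "" && (devices.lookup did).isSome
              then ((devices.lookup did).getD []).lookup "area_id"
              else area
            | none => area
        let areas :=
          match area with
          | some s => if s ≠ "" then st.2.1.insert s (st.2.1.getD s 0 + 1) else st.2.1
          | none => st.2.1
        (domains, areas, device_classes))
      (d1, d2, d3)
    = (l.foldl (fun d eid =>
          let v := ((lk.getD eid []).lookup "domain").getD ""
          if v ≠ "" then d.insert v (d.getD v 0 + 1) else d) d1,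
       l.foldl (fun d eid => pvStepO d (pvResolveArea devices (lk.getD eid []))) d2,
       l.foldl (fun d eid => pvStepO d ((lk.getD eid []).lookup "device_class")) d3) := by
  induction l generalizing d1 d2 d3 with
  | nil => rfl
  | cons eid rest ih =>
    simp only [List.foldl_cons]
    rw [ih]
    congr 2
    exact (stepO_area_eq devices (lk.getD eid []) d2).symm ▸ rfl

-- ===== VERDICT (by name: the statement is the Claim_ definition above) =====
theorem build_cluster_info_py_spec : Claim_equal_build_cluster_info_py := by
  intro member_ids entities devices _
  unfold Spec_build_cluster_info_py build_cluster_info_py build_cluster_info_py_alt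
  simp only [pvTallyS, pvTallyO, List.foldl_map]
  rw [fused_eq]
  rfl
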